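-- pv_equiv track=rewrite | github.com/momom2/Wesnoth-AI | tools/scenario_events.py | _split_macro_args
-- ===== SOURCE A (Python) =====
-- from typing import Callable, Dict, Iterable, List, Optional, Set, Tuple
--
-- def _split_macro_args(arg_str: str) -> List[str]:
--     """Split macro invocation arguments respecting quoted strings."""
--     args: List[str] = []
--     cur = ""
--     in_quote = False
--     for ch in arg_str:
--         if ch == '"':
--             in_quote = not in_quote
--             cur += ch
--         elif ch.isspace() and not in_quote:
--             if cur:
--                 args.append(cur)
--                 cur = ""
--         else:
--             cur += ch
--     if cur:
--         args.append(cur)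
--     return args
-- ===== SOURCE B (Python) =====
-- from typing import List
--
-- def _split_macro_args(arg_str: str) -> List[str]:
--     """Split macro invocation arguments respecting quoted strings.
--
--     Scanner version: skip whitespace, then take one maximal token by index
--     (jumping over quoted segments with str.find), and slice it out.
--     """
--     tokens: List[str] = []
--     i, n = 0, len(arg_str)
--     while i < n:
--         if arg_str[i].isspace():
--             i += 1
--         else:
--             j = i
--             while j < n:
--                 c = arg_str[j]
--                 if c == '"':
--                     k = arg_str.find('"', j + 1)
--                     j = n if k < 0 else k + 1
--                 elif c.isspace():
--                     break
--                 else: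
--                     j += 1
--             tokens.append(arg_str[i:j])
--             i = j
--     return tokens
-- ===== Notes on version B (the rewrite author's own statement) =====
-- stated objective: alternative
-- what changed: Replaces the single character-by-character loop with an in_quote flag and a growing accumulator string by an index scanner: skip whitespace, then find each token's end index in one jump per segment (str.find to skip quoted runs) and slice the token out; no per-character string concatenation and no quote flag.
import Mathlib
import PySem

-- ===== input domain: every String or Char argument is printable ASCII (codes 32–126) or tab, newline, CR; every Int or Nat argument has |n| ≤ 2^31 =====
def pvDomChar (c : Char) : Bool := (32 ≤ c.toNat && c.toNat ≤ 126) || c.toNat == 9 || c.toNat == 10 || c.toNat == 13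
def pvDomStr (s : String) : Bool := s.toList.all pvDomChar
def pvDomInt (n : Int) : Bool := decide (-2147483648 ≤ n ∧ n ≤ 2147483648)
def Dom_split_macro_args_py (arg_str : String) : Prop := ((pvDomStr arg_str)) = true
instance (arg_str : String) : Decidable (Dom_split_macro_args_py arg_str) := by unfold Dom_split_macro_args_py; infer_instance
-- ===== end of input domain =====

-- B is an alternative implementation (a token scanner that jumps over quoted runs)
-- of A's single character loop with an in_quote flag; return values proved equal.

-- ===== PORT A =====
-- A's for-loop over the characters, state (args, cur, in_quote), as structural
-- recursion over the remaining characters; the trailing `if cur:` flush is the [] case.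
def pvLoopA (cs : List Char) (args : List (List Char)) (cur : List Char) (inq : Bool) :
    List (List Char) :=
  match cs with
  | [] => if cur ≠ [] then args ++ [cur] else args
  | c :: rest =>
    if c = '"' then
      pvLoopA rest args (cur ++ [c]) (!inq)
    else if PySem.Chars.isspace c = true ∧ inq = false then
      if cur ≠ [] then pvLoopA rest (args ++ [cur]) [] inq
      else pvLoopA rest args [] inq
    else
      pvLoopA rest args (cur ++ [c]) inq

def split_macro_args_py (arg_str : String) : List String :=
  (pvLoopA arg_str.toList [] [] false).map String.mk

-- ===== PORT B =====
-- B's quoted-run jump `arg_str.find('"', j+1)`: characters up to and including the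
-- next '"' (all of them if unterminated), plus the remainder of the string.
def pvTakeQ : List Char → List Char × List Char
  | [] => ([], [])
  | c :: rest =>
    if c = '"' then ([c], rest)
    else (c :: (pvTakeQ rest).1, (pvTakeQ rest).2)

theorem pvTakeQ_len (cs : List Char) : (pvTakeQ cs).2.length ≤ cs.length := by
  induction cs with
  | nil => simp [pvTakeQ]
  | cons c rest ih => by_cases h : c = '"' <;> simp [pvTakeQ, h] <;> omega

-- B's inner `while j < n` loop: one maximal token (= arg_str[i:j]) and the remainder.
def pvTakeTok : List Char → List Char × List Char
  | [] => ([], [])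
  | c :: rest =>
    if c = '"' then
      (c :: ((pvTakeQ rest).1 ++ (pvTakeTok (pvTakeQ rest).2).1),
       (pvTakeTok (pvTakeQ rest).2).2)
    else if PySem.Chars.isspace c then
      ([], c :: rest)
    else
      (c :: (pvTakeTok rest).1, (pvTakeTok rest).2)
termination_by cs => cs.length
decreasing_by
    · exact Nat.lt_succ_of_le (pvTakeQ_len rest)
    · simp

theorem pvTakeTok_len (cs : List Char) : (pvTakeTok cs).2.length ≤ cs.length := by
  induction cs using pvTakeTok.induct with
  | case1 => simp [pvTakeTok]
  | case2 rest ih =>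
    have h1 := pvTakeQ_len rest
    simp [pvTakeTok]
    omega
  | case3 c rest h hs => simp [pvTakeTok, h, hs]
  | case4 c rest h hs ih =>
    simp only [pvTakeTok, if_neg h, if_neg hs, List.length_cons]
    omega

theorem pvTakeTok_cons_len (c : Char) (rest : List Char)
    (h : ¬ PySem.Chars.isspace c = true) :
    (pvTakeTok (c :: rest)).2.length ≤ rest.length := by
  by_cases hq : c = '"'
  · have h1 := pvTakeQ_len rest
    have h2 := pvTakeTok_len (pvTakeQ rest).2
    simp only [pvTakeTok, if_pos hq]
    omega
  · have h2 := pvTakeTok_len rest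
    simp only [pvTakeTok, if_neg hq, if_neg h]
    omega

-- B's outer `while i < n` loop: skip one whitespace char, or slice out one token.
def pvSplitB : List Char → List (List Char)
  | [] => []
  | c :: rest =>
    if h : PySem.Chars.isspace c then pvSplitB rest
    else (pvTakeTok (c :: rest)).1 :: pvSplitB (pvTakeTok (c :: rest)).2
termination_by cs => cs.length
decreasing_by
    · simp
    · exact Nat.lt_succ_of_le (pvTakeTok_cons_len c rest h)

def split_macro_args_py_alt (arg_str : String) : List String :=
  (pvSplitB arg_str.toList).map String.mk

-- ===== PRECONDITION & SPEC =====
def Spec_split_macro_args_py (arg_str : String) (out : List String) : Prop := out = split_macro_args_py_alt arg_str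
instance (arg_str : String) (out : List String) : Decidable (Spec_split_macro_args_py arg_str out) := by unfold Spec_split_macro_args_py; infer_instance

-- ===== CLAIM (what is proved, stated in full; the proofs are below) =====
def Claim_equal_split_macro_args_py : Prop := ∀ (arg_str : String), Dom_split_macro_args_py arg_str → Spec_split_macro_args_py arg_str (split_macro_args_py arg_str)

-- ===== LEMMAS AND PROOFS =====

theorem pv_quote_ne_space : PySem.Chars.isspace '"' = false := by decide

-- While in_quote, A appends exactly the characters B's quoted-run jump covers.
theorem pv_L1 (cs : List Char) : ∀ (args : List (List Char)) (cur : List Char),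
    pvLoopA cs args cur true
      = pvLoopA (pvTakeQ cs).2 args (cur ++ (pvTakeQ cs).1) false := by
  induction cs with
  | nil => intro args cur; simp [pvLoopA, pvTakeQ]
  | cons c rest ih =>
    intro args cur
    by_cases h : c = '"'
    · subst h; simp [pvLoopA, pvTakeQ]
    · have hns : ¬ (PySem.Chars.isspace c = true ∧ true = false) := by simp
      rw [pvLoopA]
      simp only [if_neg h, if_neg hns]
      rw [ih, pvTakeQ]
      simp [if_neg h]

-- From a not-in-quote state, A consumes exactly B's next token into cur.
theorem pv_L2 (cs : List Char) : ∀ (args : List (List Char)) (cur : List Char),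
    pvLoopA cs args cur false
      = pvLoopA (pvTakeTok cs).2 args (cur ++ (pvTakeTok cs).1) false := by
  induction cs using pvTakeTok.induct with
  | case1 => intro args cur; simp [pvTakeTok]
  | case2 rest ih =>
    intro args cur
    rw [pvLoopA]
    simp only [if_pos rfl, Bool.not_false]
    rw [pv_L1, ih]
    simp [pvTakeTok]
  | case3 c rest h hs =>
    intro args cur
    simp [pvTakeTok, h, hs]
  | case4 c rest h hs ih =>
    intro args cur
    have hns : ¬ (PySem.Chars.isspace c = true ∧ false = false) := by simp [hs]
    rw [pvLoopA, if_neg h, if_neg hns, ih args (cur ++ [c])]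
    simp [pvTakeTok, h, hs]

-- B's token ends at the end of input or just before a whitespace character.
theorem pv_rest (cs : List Char) :
    (pvTakeTok cs).2 = [] ∨
      ∃ s r, (pvTakeTok cs).2 = s :: r ∧ PySem.Chars.isspace s = true := by
  induction cs using pvTakeTok.induct with
  | case1 => left; simp [pvTakeTok]
  | case2 rest ih => simpa only [pvTakeTok, if_pos rfl] using ih
  | case3 c rest h hs =>
    right; exact ⟨c, rest, by simp [pvTakeTok, h, hs], by simpa using hs⟩
  | case4 c rest h hs ih => simpa only [pvTakeTok, if_neg h, if_neg hs] using ih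

theorem pv_tok_ne_nil (c : Char) (rest : List Char) :
    ¬ PySem.Chars.isspace c = true → (pvTakeTok (c :: rest)).1 ≠ [] := by
  intro h
  by_cases hq : c = '"' <;> simp [pvTakeTok, hq, h]

theorem pv_main (cs : List Char) : ∀ (args : List (List Char)),
    pvLoopA cs args [] false = args ++ pvSplitB cs := by
  induction cs using pvSplitB.induct with
  | case1 => intro args; simp [pvLoopA, pvSplitB]
  | case2 c rest hs ih =>
    intro args
    have hq : ¬ c = '"' := by
      intro e; rw [e] at hs; exact absurd hs (by simp [pv_quote_ne_space])
    have hcond : PySem.Chars.isspace c = true ∧ false = false := ⟨hs, rfl⟩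
    rw [pvLoopA]
    simp [hq, hcond, pvSplitB, hs, ih]
  | case3 c rest hs ih =>
    intro args
    have htne := pv_tok_ne_nil c rest hs
    have hsplit : pvSplitB (c :: rest)
        = (pvTakeTok (c :: rest)).1 :: pvSplitB (pvTakeTok (c :: rest)).2 := by
      rw [pvSplitB]; simp [hs]
    rw [pv_L2, hsplit]
    simp only [List.nil_append]
    rcases pv_rest (c :: rest) with hr | ⟨s, r, hr, hsp⟩
    · rw [hr, pvLoopA]
      simp [htne, pvSplitB]
    · have hsq : ¬ s = '"' := by
        intro e; rw [e] at hsp; exact absurd hsp (by simp [pv_quote_ne_space])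
      rw [hr, pvLoopA, if_neg hsq, if_pos ⟨hsp, rfl⟩, if_pos htne]
      have step : pvLoopA (s :: r) (args ++ [(pvTakeTok (c :: rest)).1])
            [] false
          = pvLoopA r (args ++ [(pvTakeTok (c :: rest)).1]) [] false := by
        rw [pvLoopA, if_neg hsq, if_pos ⟨hsp, rfl⟩]
        simp
      rw [← step, ← hr, ih]
      simp

-- ===== VERDICT (by name: the statement is the Claim_ definition above) =====
theorem split_macro_args_py_spec : Claim_equal_split_macro_args_py := by
  intro s _
  unfold Spec_split_macro_args_py split_macro_args_py split_macro_args_py_alt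
  rw [pv_main]
  simp
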